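-- pv_equiv track=rewrite | github.com/ds5105119/algorithm | 11386_3.py | count_non_periodic_strings
-- ===== SOURCE A (Python) =====
-- def count_non_periodic_strings(limit, mod):
--     B = [0] * (limit + 1)
--     B[0] = 1  # Base case
--
--     for L in range(1, limit + 1):
--         B[L] = pow(2, L, mod)
--         for i in range(1, L // 2 + 1):
--             B[L] -= B[i] * pow(2, L - 2 * i, mod)
--             B[L] %= mod
--
--     return B
-- ===== SOURCE B (Python) =====
-- def count_non_periodic_strings(limit, mod):
--     B = [0] * (limit + 1)
--     B[0] = 1
--     S = 0  # running value of sum(B[i] * 2**(L - 2*i) for i in 1..L//2), mod mod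
--     for L in range(1, limit + 1):
--         S = (2 * S) % mod
--         if L % 2 == 0:
--             S = (S + B[L // 2]) % mod
--         B[L] = (pow(2, L, mod) - S) % mod
--     return B
-- ===== Notes on version B (the rewrite author's own statement) =====
-- stated objective: faster
-- what changed: Replaces A's inner loop over i=1..L//2 (each iteration a pow and a subtraction) by a single running accumulator S that is doubled mod mod each step and gains B[L//2] when L is even, so each L costs O(1) instead of O(L).
import Mathlib
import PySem

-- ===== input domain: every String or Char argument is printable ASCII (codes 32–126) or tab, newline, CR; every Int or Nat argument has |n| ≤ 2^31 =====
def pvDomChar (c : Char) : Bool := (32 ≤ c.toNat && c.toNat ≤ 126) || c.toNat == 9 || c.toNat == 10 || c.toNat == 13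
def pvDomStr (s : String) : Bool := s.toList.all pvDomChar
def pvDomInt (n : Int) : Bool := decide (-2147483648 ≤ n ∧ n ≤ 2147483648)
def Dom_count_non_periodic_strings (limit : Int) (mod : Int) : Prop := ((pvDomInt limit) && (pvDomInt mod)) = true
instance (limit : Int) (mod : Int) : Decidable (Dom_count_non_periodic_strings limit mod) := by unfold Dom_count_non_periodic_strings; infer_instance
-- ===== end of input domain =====

-- B replaces A's quadratic inner divisor-sum loop by a single O(1) running accumulator
-- update per L (objective: faster, O(n^2) → O(n) loop iterations).

-- ===== PORT A =====
-- inner loop: for i in range(1, L//2+1): B[L] -= B[i]*pow(2, L-2*i, mod); B[L] %= mod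
def pvInnerA (mod : Int) (L : Nat) (B : List Int) : List Int :=
  (List.range' 1 (L / 2)).foldl
    (fun B i =>
      let B := B.set L (B.getD L 0 - B.getD i 0 * PySem.Int.powMod 2 (L - 2 * i) mod)
      B.set L (PySem.Int.mod (B.getD L 0) mod)) B

def count_non_periodic_strings (limit : Int) (mod : Int) : List Int :=
  let B := (List.replicate (limit + 1).toNat (0 : Int)).set 0 1
  (List.range' 1 limit.toNat).foldl
    (fun B L => pvInnerA mod L (B.set L (PySem.Int.powMod 2 L mod))) B

-- ===== PORT B =====
-- one pass, state (B, S); S is the running value of the subtracted sum mod mod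
def pvStepB (mod : Int) (p : List Int × Int) (L : Nat) : List Int × Int :=
  let S := PySem.Int.mod (2 * p.2) mod
  let S := if L % 2 == 0 then PySem.Int.mod (S + p.1.getD (L / 2) 0) mod else S
  (p.1.set L (PySem.Int.mod (PySem.Int.powMod 2 L mod - S) mod), S)

def count_non_periodic_strings_alt (limit : Int) (mod : Int) : List Int :=
  let B := (List.replicate (limit + 1).toNat (0 : Int)).set 0 1
  ((List.range' 1 limit.toNat).foldl (pvStepB mod) (B, 0)).1

-- ===== PRECONDITION & SPEC =====
-- Pre_ excludes exactly the inputs where the Python A raises: negative limit (IndexError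
-- assigning B[0] on an empty/negative-size list) and mod = 0 with limit ≥ 1 (ValueError
-- from pow(2, L, 0)); B raises there as well.
def Pre_count_non_periodic_strings (limit : Int) (mod : Int) : Prop :=
  0 ≤ limit ∧ (mod ≠ 0 ∨ limit = 0)
instance (limit : Int) (mod : Int) : Decidable (Pre_count_non_periodic_strings limit mod) := by
  unfold Pre_count_non_periodic_strings; infer_instance

def pvWitness_count_non_periodic_strings : Int × Int := (6, 7)

def Spec_count_non_periodic_strings (limit : Int) (mod : Int) (out : List Int) : Prop := out = count_non_periodic_strings_alt limit mod
instance (limit : Int) (mod : Int) (out : List Int) : Decidable (Spec_count_non_periodic_strings limit mod out) := by unfold Spec_count_non_periodic_strings; infer_instance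

-- ===== CLAIM (what is proved, stated in full; the proofs are below) =====
def Claim_equal_count_non_periodic_strings : Prop := ∀ (limit : Int) (mod : Int), Dom_count_non_periodic_strings limit mod → Pre_count_non_periodic_strings limit mod → Spec_count_non_periodic_strings limit mod (count_non_periodic_strings limit mod)

-- ===== LEMMAS AND PROOFS =====

-- Python % is Int.fmod; two integers congruent mod m ≠ 0 have equal Python remainders.
lemma pv_mod_dvd_sub (m a : Int) : m ∣ a - PySem.Int.mod a m := by
  refine ⟨a.fdiv m, ?_⟩
  have h := Int.mul_fdiv_add_fmod a m
  simp [PySem.Int.mod]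
  linarith

lemma pv_mod_congr {m a b : Int} (hm : m ≠ 0) (h : m ∣ a - b) :
    PySem.Int.mod a m = PySem.Int.mod b m := by
  have d1 := pv_mod_dvd_sub m a
  have d2 := pv_mod_dvd_sub m b
  have d3 : m ∣ PySem.Int.mod a m - PySem.Int.mod b m := by
    have : PySem.Int.mod a m - PySem.Int.mod b m = (a - b) - (a - PySem.Int.mod a m) + (b - PySem.Int.mod b m) := by ring
    rw [this]
    exact dvd_add (dvd_sub h d1) d2
  rcases lt_trichotomy m 0 with hlt | hz | hgt
  · have b1 := PySem.Int.mod_neg_bounds a hlt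
    have b2 := PySem.Int.mod_neg_bounds b hlt
    have := Int.eq_zero_of_dvd_of_natAbs_lt_natAbs d3 (by omega)
    omega
  · exact absurd hz hm
  · have b1 := PySem.Int.mod_nonneg a hgt
    have b2 := PySem.Int.mod_lt a hgt
    have b3 := PySem.Int.mod_nonneg b hgt
    have b4 := PySem.Int.mod_lt b hgt
    have := Int.eq_zero_of_dvd_of_natAbs_lt_natAbs d3 (by omega)
    omega

-- the subtracted sum Σ_{i=1}^{L/2} B[i] * 2^(L-2i)
def pvSum (B : List Int) (L : Nat) : Int :=
  ((List.range' 1 (L / 2)).map (fun i => B.getD i 0 * 2 ^ (L - 2 * i))).sum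

lemma pvSum_set_high (B : List Int) (v : Int) (L k : Nat) (h : L / 2 < k) :
    pvSum (B.set k v) L = pvSum B L := by
  unfold pvSum
  congr 1
  refine List.map_congr_left (fun i hi => ?_)
  rw [List.mem_range'_1] at hi
  have : k ≠ i := by omega
  simp [List.getD_eq_getElem?_getD, List.getElem?_set_ne this]

lemma pvSum_succ (B : List Int) (t : Nat) :
    pvSum B (t + 1) =
      2 * pvSum B t + (if (t + 1) % 2 = 0 then B.getD ((t + 1) / 2) 0 else 0) := by
  unfold pvSum
  have hterm : ∀ i ∈ List.range' 1 (t / 2),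
      B.getD i 0 * 2 ^ (t + 1 - 2 * i) = 2 * (B.getD i 0 * 2 ^ (t - 2 * i)) := by
    intro i hi
    rw [List.mem_range'_1] at hi
    have he : t + 1 - 2 * i = (t - 2 * i) + 1 := by omega
    rw [he, pow_succ]; ring
  by_cases hpar : (t + 1) % 2 = 0
  · -- t odd: one extra term, of exponent 0
    have h2 : (t + 1) / 2 = t / 2 + 1 := by omega
    rw [h2, List.range'_concat, List.map_append, List.sum_append]
    simp only [List.map_cons, List.map_nil, List.sum_cons, List.sum_nil]
    have he0 : t + 1 - 2 * (1 + 1 * (t / 2)) = 0 := by omega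
    have hidx : 1 + 1 * (t / 2) = (t + 1) / 2 := by omega
    rw [List.map_congr_left hterm, List.sum_map_mul_left, hidx]
    have hz : t + 1 - 2 * (t / 2 + 1) = 0 := by omega
    simp [hpar, hz, h2]
  · have h2 : (t + 1) / 2 = t / 2 := by omega
    rw [h2, List.map_congr_left hterm, List.sum_map_mul_left]
    simp [hpar]

-- characterization of A's inner loop on a list whose entry L is a Python remainder
lemma pvInnerA_aux (m : Int) (hm : m ≠ 0) (L : Nat) :
    ∀ (k : Nat) (B : List Int) (y : Int), L < B.length → 2 * k ≤ L →
      (List.range' 1 k).foldl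
        (fun B i =>
          let B := B.set L (B.getD L 0 - B.getD i 0 * PySem.Int.powMod 2 (L - 2 * i) m)
          B.set L (PySem.Int.mod (B.getD L 0) m))
        (B.set L (PySem.Int.mod y m)) =
      B.set L (PySem.Int.mod
        (y - ((List.range' 1 k).map (fun i => B.getD i 0 * 2 ^ (L - 2 * i))).sum) m) := by
  intro k
  induction k with
  | zero => intro B y _ _; simp
  | succ k ih =>
    intro B y hlen hk
    rw [List.range'_concat, List.foldl_append, ih B y hlen (by omega)]
    simp only [List.foldl_cons, List.foldl_nil]
    rw [List.map_append, List.sum_append]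
    simp only [List.map_cons, List.map_nil, List.sum_cons, List.sum_nil, one_mul]
    set Sk := ((List.range' 1 k).map (fun i => B.getD i 0 * 2 ^ (L - 2 * i))).sum with hSk
    have hgL : (B.set L (PySem.Int.mod (y - Sk) m)).getD L 0 = PySem.Int.mod (y - Sk) m := by
      simp [List.getD_eq_getElem?_getD, List.getElem?_set_self hlen]
    have hgi : (B.set L (PySem.Int.mod (y - Sk) m)).getD (1 + k) 0 = B.getD (1 + k) 0 := by
      have hne : L ≠ 1 + k := by omega
      simp [List.getD_eq_getElem?_getD, List.getElem?_set_ne hne]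
    rw [hgL, hgi]
    have hgL2 : (((B.set L (PySem.Int.mod (y - Sk) m))).set L
        (PySem.Int.mod (y - Sk) m - B.getD (1 + k) 0 * PySem.Int.powMod 2 (L - 2 * (1 + k)) m)).getD L 0
        = PySem.Int.mod (y - Sk) m - B.getD (1 + k) 0 * PySem.Int.powMod 2 (L - 2 * (1 + k)) m := by
      simp [List.getD_eq_getElem?_getD, hlen]
    rw [hgL2, List.set_set, List.set_set]
    congr 1
    apply pv_mod_congr hm
    simp only [add_zero]
    have d1 := pv_mod_dvd_sub m (y - Sk)
    have d2 := pv_mod_dvd_sub m ((2 : Int) ^ (L - 2 * (1 + k)))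
    have key : PySem.Int.mod (y - Sk) m - B.getD (1 + k) 0 * PySem.Int.powMod 2 (L - 2 * (1 + k)) m -
        (y - (Sk + B.getD (1 + k) 0 * 2 ^ (L - 2 * (1 + k)))) =
        -((y - Sk) - PySem.Int.mod (y - Sk) m) +
        B.getD (1 + k) 0 * ((2 : Int) ^ (L - 2 * (1 + k)) - PySem.Int.mod ((2 : Int) ^ (L - 2 * (1 + k))) m) := by
      simp [PySem.Int.powMod]; ring
    rw [key]
    exact dvd_add (dvd_neg.mpr d1) (Dvd.dvd.mul_left d2 _)

lemma pvStepA_eq (m : Int) (hm : m ≠ 0) (L : Nat) (B : List Int)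
    (hL : L < B.length) :
    pvInnerA m L (B.set L (PySem.Int.powMod 2 L m)) =
      B.set L (PySem.Int.mod ((2 : Int) ^ L - pvSum B L) m) := by
  have h2 : 2 * (L / 2) ≤ L := by omega
  have := pvInnerA_aux m hm L (L / 2) B ((2 : Int) ^ L) hL h2
  unfold pvInnerA pvSum
  simpa [PySem.Int.powMod] using this

-- the combined loop invariant
lemma pv_main_inv (m : Int) (hm : m ≠ 0) (B0 : List Int) :
    ∀ (t : Nat), t < B0.length →
      ((List.range' 1 t).foldl
          (fun B L => pvInnerA m L (B.set L (PySem.Int.powMod 2 L m))) B0 =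
        ((List.range' 1 t).foldl (pvStepB m) (B0, 0)).1) ∧
      ((List.range' 1 t).foldl (pvStepB m) (B0, 0)).1.length = B0.length ∧
      m ∣ ((List.range' 1 t).foldl (pvStepB m) (B0, 0)).2 -
        pvSum ((List.range' 1 t).foldl (pvStepB m) (B0, 0)).1 t := by
  intro t
  induction t with
  | zero => intro _; exact ⟨rfl, rfl, by simp [pvSum]⟩
  | succ t ih =>
    intro hlt
    obtain ⟨hEq, hLen, hDvd⟩ := ih (by omega)
    rw [List.range'_concat]
    simp only [List.foldl_append, List.foldl_cons, List.foldl_nil, one_mul]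
    set P := (List.range' 1 t).foldl (pvStepB m) (B0, 0) with hP
    rw [hEq]
    have e1t : (1 + t : Nat) = t + 1 := Nat.add_comm 1 t
    rw [e1t]
    have hlenP : (t + 1) < P.1.length := by rw [hLen]; omega
    rw [pvStepA_eq m hm (t + 1) P.1 hlenP]
    have hkey : m ∣ (pvStepB m P (t + 1)).2 - pvSum P.1 (t + 1) := by
      rw [pvSum_succ]
      show m ∣ (if ((t + 1) % 2 == 0) = true
          then PySem.Int.mod (PySem.Int.mod (2 * P.2) m + P.1.getD ((t + 1) / 2) 0) m
          else PySem.Int.mod (2 * P.2) m) -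
        (2 * pvSum P.1 t + if (t + 1) % 2 = 0 then P.1.getD ((t + 1) / 2) 0 else 0)
      have dA := pv_mod_dvd_sub m (2 * P.2)
      by_cases hpar : (t + 1) % 2 = 0
      · simp only [hpar, beq_self_eq_true, if_pos]
        set g := P.1.getD ((t + 1) / 2) 0
        have dB := pv_mod_dvd_sub m (PySem.Int.mod (2 * P.2) m + g)
        have hrw : PySem.Int.mod (PySem.Int.mod (2 * P.2) m + g) m - (2 * pvSum P.1 t + g) =
            -((PySem.Int.mod (2 * P.2) m + g) - PySem.Int.mod (PySem.Int.mod (2 * P.2) m + g) m) +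
            (2 * P.2 - PySem.Int.mod (2 * P.2) m) * (-1) + 2 * (P.2 - pvSum P.1 t) := by ring
        rw [hrw]
        exact dvd_add (dvd_add (dvd_neg.mpr dB) (Dvd.dvd.mul_right dA (-1))) (Dvd.dvd.mul_left hDvd 2)
      · have hpar' : ¬ ((t + 1) % 2 == 0) = true := by simpa using hpar
        simp only [hpar', hpar, Bool.false_eq_true, if_false, add_zero]
        have hrw : PySem.Int.mod (2 * P.2) m - 2 * pvSum P.1 t =
            -(2 * P.2 - PySem.Int.mod (2 * P.2) m) + 2 * (P.2 - pvSum P.1 t) := by ring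
        rw [hrw]
        exact dvd_add (dvd_neg.mpr dA) (Dvd.dvd.mul_left hDvd 2)
    have hfst : (pvStepB m P (t + 1)).1 =
        P.1.set (t + 1) (PySem.Int.mod (PySem.Int.powMod 2 (t + 1) m - (pvStepB m P (t + 1)).2) m) := rfl
    have harr : P.1.set (t + 1) (PySem.Int.mod ((2 : Int) ^ (t + 1) - pvSum P.1 (t + 1)) m) =
        (pvStepB m P (t + 1)).1 := by
      rw [hfst]
      congr 1
      apply pv_mod_congr hm
      have d := pv_mod_dvd_sub m ((2 : Int) ^ (t + 1))
      have hrw : (2 : Int) ^ (t + 1) - pvSum P.1 (t + 1) -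
          (PySem.Int.powMod 2 (t + 1) m - (pvStepB m P (t + 1)).2) =
          ((2 : Int) ^ (t + 1) - PySem.Int.mod ((2 : Int) ^ (t + 1)) m) +
          ((pvStepB m P (t + 1)).2 - pvSum P.1 (t + 1)) := by
        simp [PySem.Int.powMod]; ring
      rw [hrw]
      exact dvd_add d hkey
    refine ⟨harr, ?_, ?_⟩
    · rw [hfst]; simp [hLen]
    · rw [hfst]
      have hhigh : (t + 1) / 2 < t + 1 := by omega
      rw [pvSum_set_high _ _ _ _ hhigh]
      exact hkey

-- ===== VERDICT (by name: the statement is the Claim_ definition above) =====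
theorem count_non_periodic_strings_spec : Claim_equal_count_non_periodic_strings := by
  intro limit mod _ hpre
  obtain ⟨hl, hmz⟩ := hpre
  unfold Spec_count_non_periodic_strings count_non_periodic_strings count_non_periodic_strings_alt
  rcases hmz with hm | h0
  · have hlen : limit.toNat < ((List.replicate (limit + 1).toNat (0 : Int)).set 0 1).length := by
      simp; omega
    exact (pv_main_inv mod hm _ limit.toNat hlen).1
  · subst h0; rfl
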